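-- pv_equiv track=rewrite | github.com/GoldenLin9/Codeforces | BinarySearch/step1/d.py | findRightMostAfter
-- ===== SOURCE A (Python) =====
-- def findRightMostAfter(t, nums):
--
--     l = 0
--     r = len(nums) - 1
--     ans = 0
--
--     while l <= r:
--         m = l + (r - l)//2
--
--         if nums[m] <= t:
--             ans = m + 1
--             l = m + 1
--
--         elif nums[m] > t:
--             r = m - 1
--
--     return ans
-- ===== SOURCE B (Python) =====
-- def findRightMostAfter(t, nums):
--     def go(sub, off, best):
--         if not sub:
--             return best
--         k = (len(sub) - 1) // 2
--         if sub[k] <= t: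
--             return go(sub[k + 1:], off + k + 1, off + k + 1)
--         return go(sub[:k], off, best)
--     return go(nums, 0, 0)
-- ===== Notes on version B (the rewrite author's own statement) =====
-- stated objective: alternative
-- what changed: Replaced A's index-pair while-loop over the whole array by a recursion on list slices: the helper carries the current sublist plus its offset, halves it with take/drop, and never manipulates an (l, r) interval.
import Mathlib
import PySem

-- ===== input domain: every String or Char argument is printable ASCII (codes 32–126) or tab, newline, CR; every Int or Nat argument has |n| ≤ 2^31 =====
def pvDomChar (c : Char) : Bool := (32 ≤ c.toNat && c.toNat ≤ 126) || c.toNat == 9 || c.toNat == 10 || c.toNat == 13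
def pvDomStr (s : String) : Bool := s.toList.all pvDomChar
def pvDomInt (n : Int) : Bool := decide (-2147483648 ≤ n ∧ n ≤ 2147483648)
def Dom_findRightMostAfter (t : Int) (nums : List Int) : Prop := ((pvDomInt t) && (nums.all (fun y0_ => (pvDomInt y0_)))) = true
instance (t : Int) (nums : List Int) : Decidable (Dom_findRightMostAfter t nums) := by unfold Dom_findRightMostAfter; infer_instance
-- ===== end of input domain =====

-- B replaces A's index-pair while-loop by a recursion on list slices (sublist + offset); objective: alternative.

-- ===== PORT A =====
-- A's while-loop over mutable l, r, ans; nums[m] is always in range (0 ≤ l ≤ m ≤ r < len),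
-- so the (unreachable) out-of-range case defaults to 0.
def findRightMostAfterLoop (t : Int) (nums : List Int) (l r ans : Int) : Int :=
  if _h : l ≤ r then
    let m := l + PySem.Int.floordiv (r - l) 2
    if (PySem.List.pyGet? nums m).getD 0 ≤ t then
      findRightMostAfterLoop t nums (m + 1) r (m + 1)
    else
      findRightMostAfterLoop t nums l (m - 1) ans
  else ans
termination_by (r + 1 - l).toNat
decreasing_by
  · have h2 := PySem.Int.floordiv_two_mid_bounds (lo := 0) (hi := r - l) (by omega)
    rw [zero_add] at h2
    omega
  · have h2 := PySem.Int.floordiv_two_mid_bounds (lo := 0) (hi := r - l) (by omega)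
    rw [zero_add] at h2
    omega

def findRightMostAfter (t : Int) (nums : List Int) : Int :=
  findRightMostAfterLoop t nums 0 ((nums.length : Int) - 1) 0

-- ===== PORT B =====
-- B's helper go(sub, off, best): recursion on the current sublist itself, halved with
-- slicing (sub[k+1:] → drop, sub[:k] → take); k is a Nat, sub[k] is always in range
-- (k = (len-1)//2 < len on a nonempty sub), so List.getD is exact here.
def findRightMostAfterGo (t : Int) : List Int → Int → Int → Int
  | sub, off, best =>
    if hne : sub = [] then best
    else
      let k : Nat := (sub.length - 1) / 2
      if sub.getD k 0 ≤ t then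
        findRightMostAfterGo t (sub.drop (k + 1)) (off + (k : Int) + 1) (off + (k : Int) + 1)
      else
        findRightMostAfterGo t (sub.take k) off best
termination_by sub => sub.length
decreasing_by
  · simp only [List.length_drop]
    have : 0 < sub.length := List.length_pos_iff.mpr hne
    omega
  · have hlen : 0 < sub.length := List.length_pos_iff.mpr hne
    simp only [List.length_take]
    omega

def findRightMostAfter_alt (t : Int) (nums : List Int) : Int :=
  findRightMostAfterGo t nums 0 0

-- ===== PRECONDITION & SPEC =====
def Spec_findRightMostAfter (t : Int) (nums : List Int) (out : Int) : Prop := out = findRightMostAfter_alt t nums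
instance (t : Int) (nums : List Int) (out : Int) : Decidable (Spec_findRightMostAfter t nums out) := by unfold Spec_findRightMostAfter; infer_instance

-- ===== CLAIM (what is proved, stated in full; the proofs are below) =====
def Claim_equal_findRightMostAfter : Prop := ∀ (t : Int) (nums : List Int), Dom_findRightMostAfter t nums → Spec_findRightMostAfter t nums (findRightMostAfter t nums)

-- ===== LEMMAS AND PROOFS =====

-- Invariant: A's loop on interval [l, r] computes what B's go computes on the
-- sublist nums[l : r+1] with offset l.
theorem loop_eq_go (t : Int) (nums : List Int) :
    ∀ (n : Nat) (l r ans : Int), (r + 1 - l).toNat ≤ n → 0 ≤ l → r < (nums.length : Int) →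
      findRightMostAfterLoop t nums l r ans =
        findRightMostAfterGo t ((nums.drop l.toNat).take (r + 1 - l).toNat) l ans := by
  intro n
  induction n with
  | zero =>
      intro l r ans h h0 hr
      rw [findRightMostAfterLoop, findRightMostAfterGo]
      have hlr : ¬ l ≤ r := by omega
      have : (r + 1 - l).toNat = 0 := by omega
      simp [hlr, this]
  | succ n ih =>
      intro l r ans h h0 hr
      rw [findRightMostAfterLoop, findRightMostAfterGo]
      by_cases hlr : l ≤ r
      · set sub := (nums.drop l.toNat).take (r + 1 - l).toNat with hsub
        have hlen : sub.length = (r + 1 - l).toNat := by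
          simp [hsub, List.length_take, List.length_drop]; omega
        have hne : sub ≠ [] := by
          intro hnil; rw [hnil] at hlen; simp at hlen; omega
        have hfd : PySem.Int.floordiv (r - l) 2 = (r - l) / 2 :=
          PySem.Int.floordiv_eq_ediv_of_pos (by norm_num)
        set m := l + PySem.Int.floordiv (r - l) 2 with hm
        have hmb : l ≤ m ∧ m ≤ r := by
          constructor <;> [skip; skip] <;> (rw [hm, hfd]; omega)
        have hk : ((sub.length - 1) / 2 : Nat) = (m - l).toNat := by
          rw [hlen, hm, hfd]; omega
        have hmnat : m.toNat = l.toNat + (m - l).toNat := by omega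
        have hmlt : m < (nums.length : Int) := by omega
        clear_value m sub
        have hidx : sub.getD ((sub.length - 1) / 2) 0 = (PySem.List.pyGet? nums m).getD 0 := by
          have h1 : sub[(m - l).toNat]? = nums[m.toNat]? := by
            rw [hsub, List.getElem?_take_of_lt (show (m - l).toNat < (r + 1 - l).toNat by omega),
              List.getElem?_drop, ← hmnat]
          rw [hk, PySem.List.pyGet?_of_nonneg nums (show (0:Int) ≤ m by omega)]
          rw [List.getD_eq_getElem?_getD, h1]
        simp only [hlr, dif_pos, dif_neg hne]
        rw [hidx]
        by_cases hle : (PySem.List.pyGet? nums m).getD 0 ≤ t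
        · simp only [hle, if_pos]
          rw [ih (m + 1) r (m + 1) (by omega) (by omega) hr]
          have hdrop : sub.drop ((sub.length - 1) / 2 + 1)
              = (nums.drop (m + 1).toNat).take (r + 1 - (m + 1)).toNat := by
            have e1 : (r + 1 - l).toNat - ((m - l).toNat + 1) = (r + 1 - (m + 1)).toNat := by omega
            have e2 : l.toNat + ((m - l).toNat + 1) = (m + 1).toNat := by omega
            rw [hk, hsub, List.drop_take, List.drop_drop, e1, e2]
          have hoff : l + (((sub.length - 1) / 2 : Nat) : Int) + 1 = m + 1 := by
            rw [hk]; omega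
          rw [hdrop, hoff]
        · simp only [hle, if_neg, not_false_iff]
          rw [ih l (m - 1) ans (by omega) h0 (by omega)]
          have htake : sub.take ((sub.length - 1) / 2)
              = (nums.drop l.toNat).take (m - 1 + 1 - l).toNat := by
            have e3 : min (m - l).toNat (r + 1 - l).toNat = (m - 1 + 1 - l).toNat := by omega
            rw [hk, hsub, List.take_take, e3]
          rw [htake]
      · have : (r + 1 - l).toNat = 0 := by omega
        simp [hlr, this]

-- ===== VERDICT (by name: the statement is the Claim_ definition above) =====
theorem findRightMostAfter_spec : Claim_equal_findRightMostAfter := by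
  intro t nums _
  unfold Spec_findRightMostAfter findRightMostAfter findRightMostAfter_alt
  rw [loop_eq_go t nums ((nums.length : Int) - 1 + 1 - 0).toNat 0 _ 0 (by omega) (by omega) (by omega)]
  congr 1
  simp
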